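-- pv_equiv track=rewrite | github.com/icsin1/searates | addons/odoo_web/controllers/main.py | _convert_date_time_format_to_xls_format
-- ===== SOURCE A (Python) =====
-- ExcelDateFormatAbbreviations = {
--     'a': 'ddd',
--     'A': 'dddd',
--     'b': 'mmm',
--     'B': 'mmmm',
--     'd': 'dd',
--     'H': 'hh',
--     'I': 'HH',
--     'M': 'mm',
--     'p': 'AM/PM',
--     'S': 'ss',
--     'y': 'yy',
--     'Y': 'yyyy',
--     'm': 'mm',
--     'j': '',
--     'w': '',
-- }
--
-- def _convert_date_time_format_to_xls_format(format_string):
--     """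
--     Convert python strftime format to excel date & time format
--     :param format_string:
--     :return:
--     """
--     converted_format = []
--     percent_char = False
--     for char in format_string:
--         if percent_char and char in ExcelDateFormatAbbreviations:
--             converted_format.append(ExcelDateFormatAbbreviations[char])
--         elif char == "%":
--             percent_char = True
--         else:
--             converted_format.append(char)
--     return "".join(converted_format)
-- ===== SOURCE B (Python) =====
-- ExcelDateFormatAbbreviations = {
--     'a': 'ddd',
--     'A': 'dddd',
--     'b': 'mmm',
--     'B': 'mmmm',
--     'd': 'dd',
--     'H': 'hh',
--     'I': 'HH',
--     'M': 'mm',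
--     'p': 'AM/PM',
--     'S': 'ss',
--     'y': 'yy',
--     'Y': 'yyyy',
--     'm': 'mm',
--     'j': '',
--     'w': '',
-- }
--
-- def _convert_date_time_format_to_xls_format(format_string):
--     """Convert python strftime format to excel date & time format."""
--     out = []
--     i = 0
--     n = len(format_string)
--     while i < n:
--         c = format_string[i]
--         if c == '%':
--             if i + 1 < n:
--                 d = format_string[i + 1]
--                 out.append(ExcelDateFormatAbbreviations.get(d, d))
--             i += 2
--         else:
--             out.append(c)
--             i += 1
--     return ''.join(out)
-- ===== Notes on version B (the rewrite author's own statement) =====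
-- stated objective: alternative
-- what changed: Replaces A's per-character scan with a never-reset percent flag by a two-character token scanner that consumes each '%x' pair as a unit (translating x via the table, '%%' to a literal '%') and copies everything else verbatim.
-- intended difference: On strings whose part after the first '%' contains '%%' or a format-key character not immediately after a '%', A's never-reset flag keeps translating key characters and silently drops every later '%' (e.g. '%Y-m' -> 'yyyy-mm'), while B translates only two-character '%x' tokens ('%Y-m' -> 'yyyy-m'), the intended strftime semantics. — e.g. on _convert_date_time_format_to_xls_format("%Y-m"): A returns "yyyy-mm", B returns "yyyy-m"
import Mathlib
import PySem

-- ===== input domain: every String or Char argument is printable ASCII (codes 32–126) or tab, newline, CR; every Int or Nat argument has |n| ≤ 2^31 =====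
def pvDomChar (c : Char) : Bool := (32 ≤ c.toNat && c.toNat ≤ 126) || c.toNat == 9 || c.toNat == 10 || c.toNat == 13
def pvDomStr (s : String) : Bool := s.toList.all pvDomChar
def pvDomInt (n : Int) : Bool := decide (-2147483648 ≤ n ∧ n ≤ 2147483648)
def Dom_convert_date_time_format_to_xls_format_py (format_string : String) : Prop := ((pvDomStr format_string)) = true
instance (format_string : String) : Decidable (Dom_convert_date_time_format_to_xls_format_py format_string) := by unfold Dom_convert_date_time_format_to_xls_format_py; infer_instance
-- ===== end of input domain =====

-- B replaces A's per-character scan with a never-reset percent flag by a two-character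
-- token scanner ('%x' consumed as a pair); A and B differ exactly on the D_ region below,
-- where B's token semantics is the intended strftime reading.


-- the module-level dict ExcelDateFormatAbbreviations (shared data, used by both ports)
def pvExcelAbbrev : PySem.Dict Char String := PySem.Dict.ofList
  [('a', "ddd"), ('A', "dddd"), ('b', "mmm"), ('B', "mmmm"), ('d', "dd"),
   ('H', "hh"), ('I', "HH"), ('M', "mm"), ('p', "AM/PM"), ('S', "ss"),
   ('y', "yy"), ('Y', "yyyy"), ('m', "mm"), ('j', ""), ('w', "")]

-- ===== PORT A =====
-- loop body: state = (converted_format, percent_char)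
def pvStepA (st : List String × Bool) (ch : Char) : List String × Bool :=
  if st.2 && pvExcelAbbrev.contains ch then
    (st.1 ++ [(pvExcelAbbrev.get? ch).getD ""], st.2)
  else if ch = '%' then (st.1, true)
  else (st.1 ++ [String.ofList [ch]], st.2)

def convert_date_time_format_to_xls_format_py (format_string : String) : String :=
  PySem.Str.join "" (format_string.toList.foldl pvStepA ([], false)).1

-- ===== PORT B =====
-- the while loop of Source B: at '%' consume two characters (the token; nothing if '%' is last,
-- else ExcelDateFormatAbbreviations.get(d, d)), otherwise copy one character verbatim
def pvLoopB : List Char → List String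
  | [] => []
  | c :: rest =>
    if c = '%' then
      match rest with
      | [] => []
      | d :: r => ((pvExcelAbbrev.get? d).getD (String.ofList [d])) :: pvLoopB r
    else String.ofList [c] :: pvLoopB rest

def convert_date_time_format_to_xls_format_py_alt (format_string : String) : String :=
  PySem.Str.join "" (pvLoopB format_string.toList)

-- ===== PRECONDITION & SPEC =====
-- the 15 keys of ExcelDateFormatAbbreviations, as a literal character list
def pvKeys : List Char := ['a', 'A', 'b', 'B', 'd', 'H', 'I', 'M', 'p', 'S', 'y', 'Y', 'm', 'j', 'w']

-- On strings whose part after the first '%' contains '%%' or a format-key character not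
-- immediately after a '%', A's never-reset flag keeps translating key characters and
-- silently drops every later '%' (e.g. "%Y-m" → "yyyy-mm"), while B translates only
-- two-character '%x' tokens ("%Y-m" → "yyyy-m"), the intended strftime semantics.
def D_convert_date_time_format_to_xls_format_py (format_string : String) : Prop :=
  ['%', '%'] <:+: format_string.toList.dropWhile (· != '%') ∨
  ∃ p ∈ (' ' :: format_string.toList.dropWhile (· != '%')).zip
      (format_string.toList.dropWhile (· != '%')), p.2 ∈ pvKeys ∧ p.1 ≠ '%' 
instance (format_string : String) : Decidable (D_convert_date_time_format_to_xls_format_py format_string) := by unfold D_convert_date_time_format_to_xls_format_py; infer_instance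

def Spec_convert_date_time_format_to_xls_format_py (format_string : String) (out : String) : Prop := ¬ D_convert_date_time_format_to_xls_format_py format_string → out = convert_date_time_format_to_xls_format_py_alt format_string
instance (format_string : String) (out : String) : Decidable (Spec_convert_date_time_format_to_xls_format_py format_string out) := by unfold Spec_convert_date_time_format_to_xls_format_py; infer_instance

def pvDiffWitness_convert_date_time_format_to_xls_format_py : String := "%Y-m"
def pvDiffWitnessOut_convert_date_time_format_to_xls_format_py : String × String := ("yyyy-mm", "yyyy-m")

-- ===== CLAIM (what is proved, stated in full; the proofs are below) =====
def Claim_unchanged_convert_date_time_format_to_xls_format_py : Prop := ∀ (format_string : String), Dom_convert_date_time_format_to_xls_format_py format_string → Spec_convert_date_time_format_to_xls_format_py format_string (convert_date_time_format_to_xls_format_py format_string)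
def Claim_changed_convert_date_time_format_to_xls_format_py : Prop := Dom_convert_date_time_format_to_xls_format_py (pvDiffWitness_convert_date_time_format_to_xls_format_py) ∧ D_convert_date_time_format_to_xls_format_py (pvDiffWitness_convert_date_time_format_to_xls_format_py) ∧ convert_date_time_format_to_xls_format_py (pvDiffWitness_convert_date_time_format_to_xls_format_py) = pvDiffWitnessOut_convert_date_time_format_to_xls_format_py.1 ∧ convert_date_time_format_to_xls_format_py_alt (pvDiffWitness_convert_date_time_format_to_xls_format_py) = pvDiffWitnessOut_convert_date_time_format_to_xls_format_py.2 ∧ pvDiffWitnessOut_convert_date_time_format_to_xls_format_py.1 ≠ pvDiffWitnessOut_convert_date_time_format_to_xls_format_py.2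
def Claim_exact_convert_date_time_format_to_xls_format_py : Prop := ∀ (format_string : String), Dom_convert_date_time_format_to_xls_format_py format_string → D_convert_date_time_format_to_xls_format_py format_string → convert_date_time_format_to_xls_format_py format_string ≠ convert_date_time_format_to_xls_format_py_alt format_string

-- ===== LEMMAS AND PROOFS =====

-- proof-side well-formedness scanner for a format tail (bridges D_'s closed form to the induction)
def pvOK : List Char → Bool
  | [] => true
  | c :: rest =>
    if c = '%' then
      match rest with
      | [] => true
      | d :: r => d != '%' && pvOK r
    else !(pvKeys.contains c) && pvOK rest

-- a tail that avoids D_'s two patterns (prev: the character before the list, never '%')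
theorem pv_ok_of (prev : Char) (t : List Char) (hp : prev ≠ '%')
    (h1 : ¬ ['%', '%'] <:+: t)
    (h2 : ∀ p ∈ (prev :: t).zip t, ¬ (p.2 ∈ pvKeys ∧ p.1 ≠ '%')) :
    pvOK t = true := by
  induction t using pvOK.induct generalizing prev with
  | case1 => rfl
  | case2 => rfl
  | case3 d r ih =>
    have hd : d ≠ '%' := by
      intro hd; subst hd
      exact h1 ⟨[], r, by simp⟩
    have e : pvOK ('%' :: d :: r) = (d != '%' && pvOK r) := by
      rw [pvOK.eq_def]; simp
    rw [e, Bool.and_eq_true]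
    refine ⟨by simpa using hd, ih d hd ?_ ?_⟩
    · intro ⟨u, v, huv⟩
      exact h1 ⟨'%' :: d :: u, v, by simp [← huv]⟩
    · intro p hpmem
      exact h2 p (by simp [List.zip, List.zipWith] at hpmem ⊢; tauto)
  | case4 c r hc ih =>
    have hck : c ∉ pvKeys := by
      intro hk
      exact h2 (prev, c) (by simp [List.zip, List.zipWith]) ⟨hk, hp⟩
    have e : pvOK (c :: r) = (!(pvKeys.contains c) && pvOK r) := by
      rw [pvOK.eq_def]; simp [hc]
    rw [e, Bool.and_eq_true]
    refine ⟨by simpa using hck, ih c hc ?_ ?_⟩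
    · intro ⟨u, v, huv⟩
      exact h1 ⟨c :: u, v, by simp [← huv]⟩
    · intro p hpmem
      exact h2 p (by simp [List.zip, List.zipWith] at hpmem ⊢; tauto)

-- ExcelDateFormatAbbreviations.get(c, ...) falls to the default exactly off pvKeys
theorem pv_get?_none {c : Char} (h : pvKeys.contains c = false) :
    pvExcelAbbrev.get? c = none := by
  rw [PySem.Dict.get?_eq_none_iff_not_mem_keys]
  intro hmem
  have hk : pvExcelAbbrev.keys = pvKeys := by decide
  rw [hk] at hmem
  simp at h
  exact h hmem

-- translation of one character once A's flag is set
def pvTransA (c : Char) : String :=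
  (pvExcelAbbrev.get? c).getD (if c = '%' then "" else String.ofList [c])

-- join with the empty separator is flatten
theorem pv_join_nil_flatten (l : List (List Char)) : PySem.Chars.join [] l = l.flatten := by
  simp only [PySem.Chars.join]
  induction l with
  | nil => simp [List.intercalate]
  | cons x t ih =>
    cases t with
    | nil => simp [List.intercalate]
    | cons y t' =>
      simp [List.intercalate, List.intersperse] at ih ⊢
      simpa using ih

-- after the first '%', A's loop appends exactly the flag-mode translations
theorem pv_foldl_true (cs : List Char) (acc : List String) :
    cs.foldl pvStepA (acc, true) = (acc ++ (cs.filter (· != '%')).map pvTransA, true) := by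
  induction cs generalizing acc with
  | nil => simp
  | cons c t ih =>
    by_cases hc : c = '%'
    · subst hc
      have hcon : pvExcelAbbrev.contains '%' = false := by decide
      simp [List.foldl, pvStepA, hcon, ih]
    · rcases h : pvExcelAbbrev.get? c with _ | v
      · have hcon : pvExcelAbbrev.contains c = false := by
          rw [PySem.Dict.contains_eq_isSome_get?, h]; rfl
        simp [List.foldl, pvStepA, hcon, hc, ih, pvTransA, h]
      · have hcon : pvExcelAbbrev.contains c = true := by
          rw [PySem.Dict.contains_eq_isSome_get?, h]; rfl
        simp [List.foldl, pvStepA, hcon, hc, ih, pvTransA, h]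

-- before the first '%', A's loop copies characters verbatim
theorem pv_foldl_false (cs : List Char) (acc : List String) (h : ∀ c ∈ cs, c ≠ '%') :
    cs.foldl pvStepA (acc, false) = (acc ++ cs.map (fun c => String.ofList [c]), false) := by
  induction cs generalizing acc with
  | nil => simp
  | cons c t ih =>
    have hc : c ≠ '%' := h c (by simp)
    have h' : ∀ x ∈ t, x ≠ '%' := fun x hx => h x (List.mem_cons_of_mem _ hx)
    simp [List.foldl, pvStepA, hc, ih _ h']

-- B's scanner copies a '%'-free prefix verbatim
theorem pvLoopB_no_pct (H r : List Char) (h : ∀ c ∈ H, c ≠ '%') :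
    pvLoopB (H ++ r) = H.map (fun c => String.ofList [c]) ++ pvLoopB r := by
  induction H with
  | nil => rfl
  | cons c t ih =>
    have hc : c ≠ '%' := h c (by simp)
    have h' : ∀ x ∈ t, x ≠ '%' := fun x hx => h x (List.mem_cons_of_mem _ hx)
    rw [List.cons_append,
      show pvLoopB (c :: (t ++ r)) = String.ofList [c] :: pvLoopB (t ++ r) from by
        rw [pvLoopB.eq_def]; simp [hc]]
    rw [ih h']
    simp

-- on a well-formed tail, A's flag-mode translation and B's token scan flatten alike
theorem pv_LOK (r : List Char) (h : pvOK r = true) :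
    (((r.filter (· != '%')).map pvTransA).map String.toList).flatten
      = ((pvLoopB r).map String.toList).flatten := by
  induction r using pvLoopB.induct with
  | case1 => rfl
  | case2 => rfl
  | case3 d rest ih =>
    have h' : (d != '%') = true ∧ pvOK rest = true := by
      have e : pvOK ('%' :: d :: rest) = (d != '%' && pvOK rest) := by
        rw [pvOK.eq_def]; simp
      rw [e, Bool.and_eq_true] at h; exact h
    obtain ⟨hfd, hrest⟩ := h'
    have hd : d ≠ '%' := by simpa using hfd
    have e1 : List.filter (· != '%') ('%' :: d :: rest) = d :: List.filter (· != '%') rest := by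
      simp [List.filter, hfd]
    have e2 : pvLoopB ('%' :: d :: rest)
        = ((pvExcelAbbrev.get? d).getD (String.ofList [d])) :: pvLoopB rest := by
      rw [pvLoopB.eq_def]; simp
    rw [e1, e2]
    simp only [List.map, List.flatten]
    rw [ih hrest]
    congr 1
    simp [pvTransA, hd]
  | case4 d rest hd ih =>
    have h' : (!(pvKeys.contains d)) = true ∧ pvOK rest = true := by
      have e : pvOK (d :: rest) = (!(pvKeys.contains d) && pvOK rest) := by
        rw [pvOK.eq_def]; simp [hd]
      rw [e, Bool.and_eq_true] at h; exact h
    obtain ⟨hk', hrest⟩ := h'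
    have hk : pvKeys.contains d = false := by simpa using hk'
    have hfd : (d != '%') = true := by simpa using hd
    have e1 : List.filter (· != '%') (d :: rest) = d :: List.filter (· != '%') rest := by
      simp [List.filter, hfd]
    have e2 : pvLoopB (d :: rest) = String.ofList [d] :: pvLoopB rest := by
      rw [pvLoopB.eq_def]; simp [hd]
    rw [e1, e2]
    simp only [List.map, List.flatten]
    rw [ih hrest]
    congr 1
    simp [pvTransA, pv_get?_none hk, hd]

theorem convert_main (s : String)
    (hD : ¬ D_convert_date_time_format_to_xls_format_py s) :
    convert_date_time_format_to_xls_format_py s = convert_date_time_format_to_xls_format_py_alt s := by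
  unfold D_convert_date_time_format_to_xls_format_py at hD
  have hD1 : ¬ ['%', '%'] <:+: s.toList.dropWhile (· != '%') := fun h => hD (Or.inl h)
  have hD2 : ∀ p ∈ (' ' :: s.toList.dropWhile (· != '%')).zip
      (s.toList.dropWhile (· != '%')), ¬ (p.2 ∈ pvKeys ∧ p.1 ≠ '%') :=
    fun p hp hc => hD (Or.inr ⟨p, hp, hc⟩)
  have hOK : pvOK (s.toList.dropWhile (· != '%')) = true := pv_ok_of ' ' _ (by decide) hD1 hD2
  apply String.toList_inj.mp
  unfold convert_date_time_format_to_xls_format_py convert_date_time_format_to_xls_format_py_alt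
  have hsplit : s.toList.takeWhile (· != '%') ++ s.toList.dropWhile (· != '%') = s.toList :=
    List.takeWhile_append_dropWhile
  have hhead : ∀ c ∈ s.toList.takeWhile (· != '%'), c ≠ '%' := by
    intro c hc
    have := List.mem_takeWhile_imp hc
    simpa using this
  have hdrop := List.head?_dropWhile_not (fun c => c != '%') s.toList
  generalize hH : List.takeWhile (fun x => x != '%') s.toList = H at hsplit hhead ⊢
  generalize hDp : List.dropWhile (fun x => x != '%') s.toList = D at hsplit hdrop hOK ⊢
  rw [← hsplit]
  cases D with
  | nil =>
    simp only [List.append_nil]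
    have hB := pvLoopB_no_pct H [] hhead
    simp only [List.append_nil] at hB
    rw [pv_foldl_false _ _ hhead]
    rw [hB]
    simp [pvLoopB]
  | cons r tail =>
    have hr : r = '%' := by simpa using hdrop
    subst hr
    rw [List.foldl_append, pv_foldl_false _ _ hhead, List.nil_append, List.foldl_cons]
    have hstep : pvStepA (H.map (fun c => String.ofList [c]), false) '%'
        = (H.map (fun c => String.ofList [c]), true) := by
      simp [pvStepA]
    rw [hstep, pv_foldl_true, pvLoopB_no_pct _ _ hhead]
    simp only [PySem.Str.toList_join, String.toList_empty, pv_join_nil_flatten,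
      List.map_append, List.flatten_append]
    have h2 := pv_LOK ('%' :: tail) hOK
    have e3 : List.filter (fun x => x != '%') ('%' :: tail)
        = List.filter (fun x => x != '%') tail := by simp
    rw [e3] at h2
    rw [h2]

-- flattened tail outputs: A's flag-mode translation / B's literal-mode token scan
def pvFA (t : List Char) : List Char :=
  (((t.filter (· != '%')).map pvTransA).map String.toList).flatten
def pvFB (r : List Char) : List Char :=
  ((pvLoopB r).map String.toList).flatten

-- the verbatim head joins back to itself
theorem pv_join_singletons (l : List Char) :
    ((l.map (fun c => String.ofList [c])).map String.toList).flatten = l := by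
  induction l with
  | nil => rfl
  | cons c t ih => simpa [Function.comp] using congrArg (c :: ·) ih

-- A's character list, decomposed at the first '%'
theorem pv_A_toList (s : String) (t : List Char)
    (hDp : List.dropWhile (fun x => x != '%') s.toList = '%' :: t) :
    (convert_date_time_format_to_xls_format_py s).toList
      = List.takeWhile (fun x => x != '%') s.toList ++ pvFA t := by
  unfold convert_date_time_format_to_xls_format_py
  have hsplit : List.takeWhile (fun x => x != '%') s.toList
      ++ List.dropWhile (fun x => x != '%') s.toList = s.toList :=
    List.takeWhile_append_dropWhile
  have hhead : ∀ c ∈ s.toList.takeWhile (· != '%'), c ≠ '%' := by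
    intro c hc
    have := List.mem_takeWhile_imp hc
    simpa using this
  rw [hDp] at hsplit
  generalize hH : List.takeWhile (fun x => x != '%') s.toList = H at hsplit hhead ⊢
  rw [← hsplit]
  rw [List.foldl_append, pv_foldl_false _ _ hhead, List.nil_append, List.foldl_cons]
  have hstep : pvStepA (H.map (fun c => String.ofList [c]), false) '%'
      = (H.map (fun c => String.ofList [c]), true) := by
    simp [pvStepA]
  rw [hstep, pv_foldl_true]
  simp only [PySem.Str.toList_join, String.toList_empty, pv_join_nil_flatten,
    List.map_append, List.flatten_append]
  rw [pv_join_singletons]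
  rfl

-- B's character list, decomposed at the first '%'
theorem pv_B_toList (s : String) (t : List Char)
    (hDp : List.dropWhile (fun x => x != '%') s.toList = '%' :: t) :
    (convert_date_time_format_to_xls_format_py_alt s).toList
      = List.takeWhile (fun x => x != '%') s.toList ++ pvFB ('%' :: t) := by
  unfold convert_date_time_format_to_xls_format_py_alt
  have hsplit : List.takeWhile (fun x => x != '%') s.toList
      ++ List.dropWhile (fun x => x != '%') s.toList = s.toList :=
    List.takeWhile_append_dropWhile
  have hhead : ∀ c ∈ s.toList.takeWhile (· != '%'), c ≠ '%' := by
    intro c hc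
    have := List.mem_takeWhile_imp hc
    simpa using this
  rw [hDp] at hsplit
  generalize hH : List.takeWhile (fun x => x != '%') s.toList = H at hsplit hhead ⊢
  rw [← hsplit, pvLoopB_no_pct _ _ hhead]
  simp only [PySem.Str.toList_join, String.toList_empty, pv_join_nil_flatten,
    List.map_append, List.flatten_append]
  rw [pv_join_singletons]
  rfl

-- the converse bridge: a well-formed tail satisfies neither of D_'s two patterns
theorem pv_ok_sound (t : List Char) : ∀ prev, prev ≠ '%' → pvOK t = true →
    ¬ ['%', '%'] <:+: t ∧ ∀ p ∈ (prev :: t).zip t, ¬ (p.2 ∈ pvKeys ∧ p.1 ≠ '%') := by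
  induction t using pvOK.induct with
  | case1 =>
    intro prev _ _
    refine ⟨fun hin => ?_, by simp⟩
    have := hin.sublist.length_le
    simp at this
  | case2 =>
    intro prev _ _
    constructor
    · intro hin
      have := hin.sublist.length_le
      simp at this
    · intro p hp2
      simp only [List.zip_cons_cons, List.zip_nil_right, List.mem_cons,
        List.not_mem_nil, or_false] at hp2
      subst hp2
      rintro ⟨hk, -⟩
      exact (show ('%' : Char) ∉ pvKeys by decide) hk
  | case3 d r ih =>
    intro prev hp h
    have hdr : (d != '%') = true ∧ pvOK r = true := by
      have e : pvOK ('%' :: d :: r) = (d != '%' && pvOK r) := by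
        rw [pvOK.eq_def]; simp
      rw [e, Bool.and_eq_true] at h; exact h
    have hd : d ≠ '%' := by simpa using hdr.1
    have IH := ih d hd hdr.2
    constructor
    · intro hin
      rcases List.infix_cons_iff.mp hin with hpre | hin2
      · rcases List.prefix_cons_iff.mp hpre with h0 | ⟨t2, het, hpre2⟩
        · simp at h0
        · have ht2 : t2 = ['%'] := by injection het with _ h2; exact h2.symm
          subst ht2
          rcases List.prefix_cons_iff.mp hpre2 with h0 | ⟨t3, het3, -⟩
          · simp at h0
          · exact hd (by injection het3 with a _; exact a.symm)
      · rcases List.infix_cons_iff.mp hin2 with hpre | hin3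
        · rcases List.prefix_cons_iff.mp hpre with h0 | ⟨t2, het, -⟩
          · simp at h0
          · exact hd (by injection het with a _; exact a.symm)
        · exact IH.1 hin3
    · intro p hp2
      simp only [List.zip_cons_cons, List.mem_cons] at hp2
      rcases hp2 with rfl | rfl | hp3
      · rintro ⟨hk, -⟩
        exact (show ('%' : Char) ∉ pvKeys by decide) hk
      · rintro ⟨-, hne⟩
        exact hne rfl
      · exact IH.2 p (by simpa [List.zip_cons_cons] using hp3)
  | case4 c r hc ih =>
    intro prev hp h
    have hcr : (!(pvKeys.contains c)) = true ∧ pvOK r = true := by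
      have e : pvOK (c :: r) = (!(pvKeys.contains c) && pvOK r) := by
        rw [pvOK.eq_def]; simp [hc]
      rw [e, Bool.and_eq_true] at h; exact h
    have hck : c ∉ pvKeys := by simpa using hcr.1
    have IH := ih c hc hcr.2
    constructor
    · intro hin
      rcases List.infix_cons_iff.mp hin with hpre | hin2
      · rcases List.prefix_cons_iff.mp hpre with h0 | ⟨t2, het, -⟩
        · simp at h0
        · exact hc (by injection het with a _; exact a.symm)
      · exact IH.1 hin2
    · intro p hp2
      simp only [List.zip_cons_cons, List.mem_cons] at hp2
      rcases hp2 with rfl | hp3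
      · rintro ⟨hk, -⟩
        exact hck hk
      · exact IH.2 p (by simpa [List.zip_cons_cons] using hp3)

-- the finite table facts, computed on the Bool side (kernel-reducible) and bridged to Prop
theorem pv_val_chars_b : (pvExcelAbbrev.items.all (fun p =>
    p.2.toList.all (fun ch => !(ch == '%' || ch == 'j' || ch == 'w')))) = true := by rfl

theorem pv_val_chars : ∀ p ∈ pvExcelAbbrev.items, ∀ ch ∈ p.2.toList,
    ¬ (ch = '%' ∨ ch = 'j' ∨ ch = 'w') := by
  intro p hp ch hch hbad
  have h1 := List.all_eq_true.mp (List.all_eq_true.mp pv_val_chars_b p hp) ch hch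
  rcases hbad with rfl | rfl | rfl <;> simp at h1

theorem pv_val_head_self_b : (pvExcelAbbrev.items.all (fun p =>
    !(p.2.toList.head? == some p.1) ||
      ((p.2.toList == [p.1, p.1]) && (p.1 == 'd' || p.1 == 'y' || p.1 == 'm')))) = true := by rfl

theorem pv_val_head_self : ∀ p ∈ pvExcelAbbrev.items, p.2.toList.head? = some p.1 →
    p.2.toList = [p.1, p.1] ∧ (p.1 = 'd' ∨ p.1 = 'y' ∨ p.1 = 'm') := by
  intro p hp hh
  have h1 := List.all_eq_true.mp pv_val_head_self_b p hp
  rw [hh] at h1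
  simp at h1
  exact ⟨h1.1, by tauto⟩

theorem pv_val_empty_b : (pvExcelAbbrev.items.all (fun p =>
    !(p.2.toList == []) || (p.1 == 'j' || p.1 == 'w'))) = true := by rfl

theorem pv_val_empty : ∀ p ∈ pvExcelAbbrev.items, p.2.toList = [] →
    p.1 = 'j' ∨ p.1 = 'w' := by
  intro p hp hh
  have h1 := List.all_eq_true.mp pv_val_empty_b p hp
  rw [hh] at h1
  simpa using h1

theorem pv_val_run_b (c : Char) (hc : c = 'd' ∨ c = 'y' ∨ c = 'm') :
    (pvExcelAbbrev.items.all (fun p => !(p.2.toList.head? == some c) ||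
      (p.2.toList == List.replicate p.2.toList.length c))) = true := by
  rcases hc with h | h | h <;> subst h <;> rfl

theorem pv_val_run (c : Char) (hc : c = 'd' ∨ c = 'y' ∨ c = 'm') :
    ∀ p ∈ pvExcelAbbrev.items, p.2.toList.head? = some c →
      p.2.toList = List.replicate p.2.toList.length c := by
  intro p hp hh
  have h1 := List.all_eq_true.mp (pv_val_run_b c hc) p hp
  rw [hh] at h1
  simpa using h1

-- component-form wrappers of the finite table facts (rw-friendly)
theorem pv_val_head_self' (k : Char) (v : String) (hm : (k, v) ∈ pvExcelAbbrev.items)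
    (hh : v.toList.head? = some k) : v.toList = [k, k] ∧ (k = 'd' ∨ k = 'y' ∨ k = 'm') :=
  pv_val_head_self (k, v) hm hh
theorem pv_val_empty' (k : Char) (v : String) (hm : (k, v) ∈ pvExcelAbbrev.items)
    (hh : v.toList = []) : k = 'j' ∨ k = 'w' :=
  pv_val_empty (k, v) hm hh
theorem pv_val_run' (c : Char) (hc : c = 'd' ∨ c = 'y' ∨ c = 'm') (k : Char) (v : String)
    (hm : (k, v) ∈ pvExcelAbbrev.items) (hh : v.toList.head? = some c) :
    v.toList = List.replicate v.toList.length c :=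
  pv_val_run c hc (k, v) hm hh

-- cancelling a same-character run against a shifted copy of itself
theorem pv_rep_shift (c : Char) (L k : Nat) (X Y : List Char)
    (h : List.replicate L c ++ X = List.replicate k c ++ (c :: (List.replicate L c ++ Y))) :
    X = List.replicate (k + 1) c ++ Y := by
  have h2 : List.replicate L c ++ X
      = List.replicate L c ++ (List.replicate (k + 1) c ++ Y) := by
    rw [h, show (c :: (List.replicate L c ++ Y)) = List.replicate (L + 1) c ++ Y from by
        simp [List.replicate_succ],
      ← List.append_assoc, ← List.replicate_add,
      show k + (L + 1) = L + (k + 1) from by omega,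
      List.replicate_add, List.append_assoc]
  exact List.append_cancel_left h2

-- A's flag-mode output never contains '%', 'j' or 'w'
theorem pv_FA_chars (t : List Char) : ∀ ch ∈ pvFA t,
    ¬ (ch = '%' ∨ ch = 'j' ∨ ch = 'w') := by
  induction t with
  | nil => simp [pvFA]
  | cons c r ih =>
    by_cases hc : c = '%'
    · subst hc
      have e : pvFA ('%' :: r) = pvFA r := by simp [pvFA]
      rw [e]; exact ih
    · have hfd : (c != '%') = true := by simpa using hc
      have e : pvFA (c :: r) = (pvTransA c).toList ++ pvFA r := by
        simp [pvFA, List.filter, hfd]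
      rw [e]
      intro ch hch hbad
      rcases List.mem_append.mp hch with hl | hr2
      · rcases hv : pvExcelAbbrev.get? c with _ | v
        · have hch' : ch = c := by
            simp [pvTransA, hv, hc] at hl; exact hl
          subst hch'
          rcases hbad with h1 | h1 | h1 <;> subst h1
          · exact hc rfl
          · exact absurd hv (by decide)
          · exact absurd hv (by decide)
        · have hmem := PySem.Dict.mem_items_of_get?_eq_some _ hv
          exact pv_val_chars _ hmem ch (by simpa [pvTransA, hv] using hl) hbad
      · exact ih ch hr2 hbad

-- B's output is never A's output shifted by a run of c ∈ {d,y,m} (infinite descent)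
theorem pv_no_shift (c : Char) (hc : c = 'd' ∨ c = 'y' ∨ c = 'm') :
    ∀ r k, 1 ≤ k → pvFB r ≠ List.replicate k c ++ pvFA r := by
  intro r
  induction r using pvLoopB.induct with
  | case1 =>
    intro k hk heq
    have := congrArg List.length heq
    simp [pvFA, pvFB, pvLoopB] at this
    omega
  | case2 =>
    intro k hk heq
    have := congrArg List.length heq
    simp [pvFA, pvFB, pvLoopB] at this
    omega
  | case3 e r2 ih =>
    intro k hk heq
    by_cases he : e = '%'
    · subst he
      have eB : pvFB ('%' :: '%' :: r2) = '%' :: pvFB r2 := by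
        unfold pvFB
        rw [show pvLoopB ('%' :: '%' :: r2)
            = ((pvExcelAbbrev.get? '%').getD (String.ofList ['%'])) :: pvLoopB r2 from by
          rw [pvLoopB.eq_def]; simp]
        simp [show pvExcelAbbrev.get? '%' = none from by decide]
      have eA : pvFA ('%' :: '%' :: r2) = pvFA r2 := by simp [pvFA]
      rw [eB, eA] at heq
      obtain ⟨k', rfl⟩ : ∃ k', k = k' + 1 := ⟨k - 1, by omega⟩
      rw [List.replicate_succ, List.cons_append] at heq
      have hhd := (List.cons.inj heq).1
      rcases hc with h | h | h <;> subst h <;> exact absurd hhd (by decide)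
    · have hfe : (e != '%') = true := by simpa using he
      have eB : pvFB ('%' :: e :: r2)
          = ((pvExcelAbbrev.get? e).getD (String.ofList [e])).toList ++ pvFB r2 := by
        unfold pvFB
        rw [show pvLoopB ('%' :: e :: r2)
            = ((pvExcelAbbrev.get? e).getD (String.ofList [e])) :: pvLoopB r2 from by
          rw [pvLoopB.eq_def]; simp]
        simp
      have eA : pvFA ('%' :: e :: r2) = (pvTransA e).toList ++ pvFA r2 := by
        simp [pvFA, List.filter, hfe]
      have etr : pvTransA e = (pvExcelAbbrev.get? e).getD (String.ofList [e]) := by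
        simp [pvTransA, he]
      rw [eB, eA, etr] at heq
      cases hw0 : ((pvExcelAbbrev.get? e).getD (String.ofList [e])).toList with
      | nil =>
        rw [hw0] at heq
        simp only [List.nil_append] at heq
        exact ih k hk heq
      | cons w0 w' =>
        rw [hw0] at heq
        obtain ⟨k', rfl⟩ : ∃ k', k = k' + 1 := ⟨k - 1, by omega⟩
        rw [List.replicate_succ] at heq
        simp only [List.cons_append] at heq
        have hw0c : w0 = c := (List.cons.inj heq).1
        subst hw0c
        rcases hv : pvExcelAbbrev.get? e with _ | v
        · -- default case: the token character e itself, so e = c ∈ {d,y,m}: impossible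
          rw [hv] at hw0
          simp at hw0
          rcases hc with h | h | h <;> rw [hw0.1, h] at hv <;> exact absurd hv (by decide)
        · have hmem := PySem.Dict.mem_items_of_get?_eq_some _ hv
          have hv0 : v.toList = w0 :: w' := by rw [hv] at hw0; simpa using hw0
          have hrun := pv_val_run' w0 hc e v hmem (by rw [hv0]; rfl)
          have hw'' : w' = List.replicate w'.length w0 := by
            rw [hv0] at hrun
            simp only [List.length_cons, List.replicate_succ] at hrun
            exact (List.cons.inj hrun).2
          have htail := (List.cons.inj heq).2
          rw [hw''] at htail
          exact ih (k' + 1) (by omega)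
            (pv_rep_shift w0 w'.length k' _ _ (by simpa [List.append_assoc] using htail))
  | case4 x r2 hx ih =>
    intro k hk heq
    have hfx : (x != '%') = true := by simpa using hx
    have eB : pvFB (x :: r2) = x :: pvFB r2 := by
      unfold pvFB
      rw [show pvLoopB (x :: r2) = String.ofList [x] :: pvLoopB r2 from by
        rw [pvLoopB.eq_def]; simp [hx]]
      simp
    have eA : pvFA (x :: r2) = (pvTransA x).toList ++ pvFA r2 := by
      simp [pvFA, List.filter, hfx]
    rw [eB, eA] at heq
    obtain ⟨k', rfl⟩ : ∃ k', k = k' + 1 := ⟨k - 1, by omega⟩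
    rw [List.replicate_succ, List.cons_append] at heq
    obtain ⟨hxc, htail⟩ := List.cons.inj heq
    subst hxc
    have hT : (pvTransA x).toList = [x, x] := by
      rcases hc with h | h | h <;> subst h <;> decide
    rw [hT] at htail
    have htail2 : pvFB r2 = List.replicate (k' + 2) x ++ pvFA r2 := by
      rw [htail, show List.replicate (k' + 2) x = List.replicate k' x ++ [x, x] from by
        rw [List.replicate_add]; rfl]
      simp [List.append_assoc]
    exact ih (k' + 2) (by omega) htail2

-- on a malformed tail (literal modes aligned) the two flattened outputs differ
theorem pv_neq (r : List Char) : pvOK r = false → pvFA r ≠ pvFB r := by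
  induction r using pvLoopB.induct with
  | case1 => intro h; exact absurd h (by decide)
  | case2 => intro h; exact absurd h (by decide)
  | case3 e r2 ih =>
    intro h heq
    by_cases he : e = '%'
    · subst he
      have eA : pvFA ('%' :: '%' :: r2) = pvFA r2 := by simp [pvFA]
      have eB : pvFB ('%' :: '%' :: r2) = '%' :: pvFB r2 := by
        unfold pvFB
        rw [show pvLoopB ('%' :: '%' :: r2)
            = ((pvExcelAbbrev.get? '%').getD (String.ofList ['%'])) :: pvLoopB r2 from by
          rw [pvLoopB.eq_def]; simp]
        simp [show pvExcelAbbrev.get? '%' = none from by decide]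
      rw [eA, eB] at heq
      exact pv_FA_chars r2 '%' (by rw [heq]; simp) (Or.inl rfl)
    · have h2 : pvOK r2 = false := by
        have e2 : pvOK ('%' :: e :: r2) = (e != '%' && pvOK r2) := by
          rw [pvOK.eq_def]; simp
        rw [e2] at h
        simpa [he] using h
      have hfe : (e != '%') = true := by simpa using he
      have eA : pvFA ('%' :: e :: r2) = (pvTransA e).toList ++ pvFA r2 := by
        simp [pvFA, List.filter, hfe]
      have eB : pvFB ('%' :: e :: r2)
          = ((pvExcelAbbrev.get? e).getD (String.ofList [e])).toList ++ pvFB r2 := by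
        unfold pvFB
        rw [show pvLoopB ('%' :: e :: r2)
            = ((pvExcelAbbrev.get? e).getD (String.ofList [e])) :: pvLoopB r2 from by
          rw [pvLoopB.eq_def]; simp]
        simp
      have etr : pvTransA e = (pvExcelAbbrev.get? e).getD (String.ofList [e]) := by
        simp [pvTransA, he]
      rw [eA, eB, etr] at heq
      exact ih h2 (List.append_cancel_left heq)
  | case4 x r2 hx ih =>
    intro h heq
    have hfx : (x != '%') = true := by simpa using hx
    have eB : pvFB (x :: r2) = x :: pvFB r2 := by
      unfold pvFB
      rw [show pvLoopB (x :: r2) = String.ofList [x] :: pvLoopB r2 from by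
        rw [pvLoopB.eq_def]; simp [hx]]
      simp
    by_cases hk : pvKeys.contains x = true
    · have hcon : pvExcelAbbrev.contains x = true := by
        rw [PySem.Dict.contains_eq_decide_mem_keys,
          show pvExcelAbbrev.keys = pvKeys from by decide]
        simpa using hk
      obtain ⟨v, hv⟩ : ∃ v, pvExcelAbbrev.get? x = some v := by
        rcases hg : pvExcelAbbrev.get? x with _ | v
        · rw [PySem.Dict.contains_eq_isSome_get?, hg] at hcon
          exact absurd hcon (by decide)
        · exact ⟨v, rfl⟩
      have hmem := PySem.Dict.mem_items_of_get?_eq_some _ hv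
      have eA : pvFA (x :: r2) = v.toList ++ pvFA r2 := by
        simp [pvFA, List.filter, hfx, pvTransA, hv]
      rw [eA, eB] at heq
      cases hv0 : v.toList with
      | nil =>
        rw [hv0, List.nil_append] at heq
        have hjw := pv_val_empty' x v hmem hv0
        exact pv_FA_chars r2 x (by rw [heq]; simp)
          (by rcases hjw with h1 | h1 <;> subst h1 <;> simp)
      | cons w0 w' =>
        rw [hv0, List.cons_append] at heq
        obtain ⟨hw0, htail⟩ := List.cons.inj heq
        have hself := pv_val_head_self' x v hmem (by rw [hv0, hw0]; rfl)
        obtain ⟨hvv, hxc⟩ := hself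
        rw [hv0] at hvv
        have hw' : w' = [x] := (List.cons.inj hvv).2
        rw [hw'] at htail
        exact pv_no_shift x hxc r2 1 (by omega)
          (by rw [← htail]; simp)
    · have hkf : pvKeys.contains x = false := by
        cases hkk : pvKeys.contains x
        · rfl
        · exact absurd hkk hk
      have h2 : pvOK r2 = false := by
        have e2 : pvOK (x :: r2) = (!(pvKeys.contains x) && pvOK r2) := by
          rw [pvOK.eq_def]; simp [hx]
        rw [e2, hkf] at h
        simpa using h
      have eA : pvFA (x :: r2) = x :: pvFA r2 := by
        simp [pvFA, List.filter, hfx, pvTransA, pv_get?_none hkf, hx]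
      rw [eA, eB] at heq
      exact ih h2 (List.cons.inj heq).2

-- ===== VERDICT (by name: the statement is the Claim_ definition above) =====
theorem convert_date_time_format_to_xls_format_py_spec : Claim_unchanged_convert_date_time_format_to_xls_format_py := by
  intro s _
  unfold Spec_convert_date_time_format_to_xls_format_py
  exact convert_main s

theorem convert_date_time_format_to_xls_format_py_changed : Claim_changed_convert_date_time_format_to_xls_format_py := by
  unfold Claim_changed_convert_date_time_format_to_xls_format_py; decide

theorem convert_date_time_format_to_xls_format_py_tight : Claim_exact_convert_date_time_format_to_xls_format_py := by
  intro s _ hD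
  rcases hcase : List.dropWhile (fun x => x != '%') s.toList with _ | ⟨r, t⟩
  · exfalso
    unfold D_convert_date_time_format_to_xls_format_py at hD
    rw [hcase] at hD
    rcases hD with h | ⟨p, hp, -⟩
    · exact absurd h (by decide)
    · simp at hp
  · have hr : r = '%' := by
      have hh := List.head?_dropWhile_not (fun c => c != '%') s.toList
      rw [hcase] at hh
      simpa using hh
    subst hr
    have hOKf : pvOK ('%' :: t) = false := by
      cases hOK : pvOK ('%' :: t)
      · rfl
      · exfalso
        have hs := pv_ok_sound ('%' :: t) ' ' (by decide) hOK
        unfold D_convert_date_time_format_to_xls_format_py at hD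
        rw [hcase] at hD
        rcases hD with h | ⟨p, hp, hc2⟩
        · exact hs.1 h
        · exact hs.2 p hp hc2
    intro heq
    have hA := pv_A_toList s t hcase
    have hB := pv_B_toList s t hcase
    have hflat : pvFA t = pvFB ('%' :: t) := by
      have h1 := congrArg String.toList heq
      rw [hA, hB] at h1
      exact List.append_cancel_left h1
    exact pv_neq ('%' :: t) hOKf
      (by rw [show pvFA ('%' :: t) = pvFA t from by simp [pvFA], hflat])
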